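-- pv_equiv track=rewrite | github.com/georgiashay/planet_x_server | game_generation/planetx_game/utilities.py | calc_partitions
-- ===== SOURCE A (Python) =====
-- def calc_partitions(n, I=2, memo={}):
--     if n in memo:
--         return memo[(n, I)]
--     elif n < I:
--         memo[(n, I)] = []
--         return []
--     else:
--         partitions = [(n,)]
--         for i in range(I, n//2 + 1):
--             # Add i to partition
--             for p in calc_partitions(n-i, i):
--                 partitions.append((i,) + p)
--
--         memo[(n, I)] = partitions
--         return partitions
-- ===== SOURCE B (Python) =====
-- def calc_partitions(n, I=2, memo=None):
--     # Correctly keyed memoization: each subproblem (n, I) is computed once per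
--     # top-level call (fresh table via the standard memo=None idiom).
--     if memo is None:
--         memo = {}
--     key = (n, I)
--     if key in memo:
--         return memo[key]
--     if n < I:
--         res = []
--     else:
--         res = [(n,)]
--         for j in range(I, n // 2 + 1):
--             for p in calc_partitions(n - j, j, memo):
--                 res.append((j,) + p)
--     memo[key] = res
--     return res
-- ===== Notes on version B (the rewrite author's own statement) =====
-- stated objective: faster
-- what changed: A's memo is dead code (it tests `n in memo` against tuple keys, so it never hits) making A a plain recursion that recomputes shared subproblems; B threads a correctly keyed (m, i) memo dict through the recursion so each subproblem is computed exactly once.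
import Mathlib
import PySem

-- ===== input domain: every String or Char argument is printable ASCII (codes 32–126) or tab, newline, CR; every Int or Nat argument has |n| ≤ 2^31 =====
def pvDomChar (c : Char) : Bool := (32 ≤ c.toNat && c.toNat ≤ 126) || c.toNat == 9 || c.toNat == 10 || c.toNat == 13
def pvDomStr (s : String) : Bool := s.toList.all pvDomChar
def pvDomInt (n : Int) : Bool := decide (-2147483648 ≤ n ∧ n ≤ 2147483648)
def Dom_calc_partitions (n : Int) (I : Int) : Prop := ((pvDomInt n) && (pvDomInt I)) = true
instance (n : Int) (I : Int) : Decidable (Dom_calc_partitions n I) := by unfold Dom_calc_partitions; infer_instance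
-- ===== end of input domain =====

-- B replaces A's dead memo (A tests `n in memo` against tuple keys, so it never hits and A
-- recomputes shared subproblems) by a correctly keyed memo table threaded through the
-- recursion, computing each subproblem (m, i) once; measured faster on large n.

-- ===== PORT A =====
-- A's `memo` parameter is dead code (`n in memo` compares an int with tuple keys, never
-- true), so A is the plain recursion below; fuel makes the recursion total in Lean
-- (fuel n.toNat + 1 is sufficient on Pre_, proved in calcA_fuel below).
def calcA : Nat → Int → Int → List (List Int)
  | 0, _, _ => []
  | f + 1, n, I =>
    if n < I then []
    else
      (PySem.List.pyRange I (PySem.Int.floordiv n 2 + 1) 1).foldl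
        (fun partitions i =>
          (calcA f (n - i) i).foldl (fun acc p => acc ++ [i :: p]) partitions)
        [[n]]

def calc_partitions (n : Int) (I : Int) : List (List Int) := calcA (n.toNat + 1) n I

-- ===== PORT B =====
-- the memo table of Source B: dict keyed by the pair (m, i)
def partsB : Nat → Int → Int → PySem.Dict (Int × Int) (List (List Int)) →
    List (List Int) × PySem.Dict (Int × Int) (List (List Int))
  | 0, _, _, t => ([], t)
  | f + 1, m, i, t =>
    match t.get? (m, i) with
    | some r => (r, t)
    | none =>
      let st :=
        if m < i then (([] : List (List Int)), t)
        else
          (PySem.List.pyRange i (PySem.Int.floordiv m 2 + 1) 1).foldl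
            (fun (st : List (List Int) × PySem.Dict (Int × Int) (List (List Int))) j =>
              let rt := partsB f (m - j) j st.2
              (rt.1.foldl (fun acc p => acc ++ [j :: p]) st.1, rt.2))
            ([[m]], t)
      (st.1, st.2.insert (m, i) st.1)

def calc_partitions_alt (n : Int) (I : Int) : List (List Int) :=
  (partsB (n.toNat + 1) n I PySem.Dict.empty).1

-- ===== PRECONDITION & SPEC =====
-- Pre_ excludes exactly the inputs where A never returns: for I ≤ 0 with n ≥ I the
-- recursion calc_partitions(n - i, i) with i ≤ 0 never shrinks n below I, so Python A
-- dies with RecursionError.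
def Pre_calc_partitions (n : Int) (I : Int) : Prop := 1 ≤ I ∨ n < I
instance (n : Int) (I : Int) : Decidable (Pre_calc_partitions n I) := by
  unfold Pre_calc_partitions; infer_instance

def pvWitness_calc_partitions : Int × Int := (7, 2)

def Spec_calc_partitions (n : Int) (I : Int) (out : List (List Int)) : Prop := out = calc_partitions_alt n I
instance (n : Int) (I : Int) (out : List (List Int)) : Decidable (Spec_calc_partitions n I out) := by
  unfold Spec_calc_partitions; infer_instance

-- ===== CLAIM (what is proved, stated in full; the proofs are below) =====
def Claim_equal_calc_partitions : Prop := ∀ (n : Int) (I : Int), Dom_calc_partitions n I → Pre_calc_partitions n I → Spec_calc_partitions n I (calc_partitions n I)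

-- ===== LEMMAS AND PROOFS =====

-- fuel does not matter once it exceeds n (parts are ≥ I ≥ 1, so n strictly decreases)
lemma calcA_fuel : ∀ (f : Nat) (n I : Int), 1 ≤ I → n.toNat < f →
    calcA f n I = calcA (n.toNat + 1) n I := by
  intro f
  induction f using Nat.strong_induction_on with
  | _ f ih =>
    intro n I hI hf
    match f, hf with
    | g + 1, _ =>
      show calcA (g + 1) n I = calcA (n.toNat + 1) n I
      simp only [calcA]
      by_cases hni : n < I
      · simp [hni]
      · simp only [if_neg hni]
        apply PySem.List.foldl_congr_mem
        intro acc i hi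
        rw [PySem.List.mem_pyRange_one] at hi
        have h1i : 1 ≤ i := le_trans hI hi.1
        have hn1 : 1 ≤ n := le_trans hI (not_lt.mp hni)
        have hlt : (n - i).toNat < n.toNat := by omega
        rw [ih g (by omega) (n - i) i h1i (by omega),
            ih n.toNat (by omega) (n - i) i h1i (by omega)]

-- A in canonical form: every recursive call at its own canonical fuel
lemma calcA_canonical (n I : Int) (hI : 1 ≤ I) :
    calc_partitions n I =
      if n < I then []
      else
        (PySem.List.pyRange I (PySem.Int.floordiv n 2 + 1) 1).foldl
          (fun partitions i =>
            (calc_partitions (n - i) i).foldl (fun acc p => acc ++ [i :: p]) partitions)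
          [[n]] := by
  show calcA (n.toNat + 1) n I = _
  simp only [calcA]
  by_cases hni : n < I
  · simp [hni]
  · simp only [if_neg hni]
    apply PySem.List.foldl_congr_mem
    intro acc i hi
    rw [PySem.List.mem_pyRange_one] at hi
    have h1i : 1 ≤ i := le_trans hI hi.1
    have hn1 : 1 ≤ n := le_trans hI (not_lt.mp hni)
    rw [calcA_fuel n.toNat (n - i) i h1i (by omega)]
    rfl

-- invariant: every entry of the memo table is the corresponding value of A
def GoodTbl (t : PySem.Dict (Int × Int) (List (List Int))) : Prop :=
  ∀ (m i : Int) (r : List (List Int)), t.get? (m, i) = some r → r = calc_partitions m i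

lemma GoodTbl_empty : GoodTbl PySem.Dict.empty := by
  intro m i r h
  rw [PySem.Dict.get?_empty] at h
  exact absurd h (by simp)

lemma GoodTbl_insert {t : PySem.Dict (Int × Int) (List (List Int))} (ht : GoodTbl t)
    (m i : Int) {r : List (List Int)} (hr : r = calc_partitions m i) :
    GoodTbl (t.insert (m, i) r) := by
  intro m' i' r' h
  rw [PySem.Dict.get?_insert] at h
  split_ifs at h with hk
  · obtain ⟨h1, h2⟩ := Prod.mk.injEq .. ▸ hk
    subst h1; subst h2
    exact (Option.some.injEq .. ▸ h) ▸ hr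
  · exact ht m' i' r' h

lemma calc_partitions_base {n I : Int} (h : n < I) : calc_partitions n I = [] := by
  show calcA (n.toNat + 1) n I = []
  simp [calcA, h]

-- memoization is correct: partsB returns A's value and keeps the table good
lemma partsB_correct : ∀ (f : Nat) (m i : Int) (t : PySem.Dict (Int × Int) (List (List Int))),
    1 ≤ i → m.toNat < f → GoodTbl t →
    (partsB f m i t).1 = calc_partitions m i ∧ GoodTbl (partsB f m i t).2 := by
  intro f
  induction f using Nat.strong_induction_on with
  | _ f ih =>
    intro m i t hi hf ht
    match f, hf with
    | g + 1, _ =>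
      show (partsB (g + 1) m i t).1 = _ ∧ GoodTbl (partsB (g + 1) m i t).2
      simp only [partsB]
      cases hget : t.get? (m, i) with
      | some r =>
        exact ⟨ht m i r hget, ht⟩
      | none =>
        by_cases hmi : m < i
        · simp only [if_pos hmi]
          refine ⟨(calc_partitions_base hmi).symm, ?_⟩
          exact GoodTbl_insert ht m i (calc_partitions_base hmi).symm
        · simp only [if_neg hmi]
          have hm1 : 1 ≤ m := le_trans hi (not_lt.mp hmi)
          -- the loop: result over any suffix of the range, from any good state
          have loop : ∀ (l : List Int) (acc : List (List Int))
              (t' : PySem.Dict (Int × Int) (List (List Int))), GoodTbl t' →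
              (∀ j ∈ l, 1 ≤ j ∧ j < m) →
              (l.foldl
                (fun (st : List (List Int) × PySem.Dict (Int × Int) (List (List Int))) j =>
                  let rt := partsB g (m - j) j st.2
                  (rt.1.foldl (fun acc p => acc ++ [j :: p]) st.1, rt.2))
                (acc, t')).1 =
                l.foldl
                  (fun partitions j =>
                    (calc_partitions (m - j) j).foldl (fun acc p => acc ++ [j :: p]) partitions)
                  acc ∧
              GoodTbl (l.foldl
                (fun (st : List (List Int) × PySem.Dict (Int × Int) (List (List Int))) j =>
                  let rt := partsB g (m - j) j st.2
                  (rt.1.foldl (fun acc p => acc ++ [j :: p]) st.1, rt.2))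
                (acc, t')).2 := by
            intro l
            induction l with
            | nil => intro acc t' ht' _; exact ⟨rfl, ht'⟩
            | cons j l' ihl =>
              intro acc t' ht' hmem
              obtain ⟨hj1, hjm⟩ := hmem j (List.mem_cons_self ..)
              have hrec := ih g (by omega) (m - j) j t' hj1 (by omega) ht'
              simp only [List.foldl_cons]
              rw [hrec.1]
              exact ihl _ _ hrec.2 (fun j' hj' => hmem j' (List.mem_cons_of_mem _ hj'))
          have hbound : ∀ j ∈ PySem.List.pyRange i (PySem.Int.floordiv m 2 + 1) 1,
              1 ≤ j ∧ j < m := by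
            intro j hj
            rw [PySem.List.mem_pyRange_one] at hj
            have h2 : PySem.Int.floordiv m 2 = m / 2 :=
              PySem.Int.floordiv_eq_ediv_of_pos (by omega)
            constructor
            · omega
            · omega
          obtain ⟨h1, h2⟩ := loop _ [[m]] t ht hbound
          refine ⟨?_, ?_⟩
          · rw [h1, calcA_canonical m i hi, if_neg hmi]
          · apply GoodTbl_insert h2
            rw [h1, calcA_canonical m i hi, if_neg hmi]

-- ===== VERDICT (by name: the statement is the Claim_ definition above) =====
theorem calc_partitions_spec : Claim_equal_calc_partitions := by
  intro n I _ hpre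
  show calc_partitions n I = calc_partitions_alt n I
  by_cases hni : n < I
  · rw [calc_partitions_base hni]
    show _ = (partsB (n.toNat + 1) n I PySem.Dict.empty).1
    simp only [partsB, PySem.Dict.get?_empty, if_pos hni]
  · have hI : 1 ≤ I := hpre.resolve_right hni
    exact ((partsB_correct (n.toNat + 1) n I PySem.Dict.empty hI (by omega)
      GoodTbl_empty).1).symm
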